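-- pv_equiv track=rewrite | github.com/lamaS10/LAB_FUNCTIONS_101 | bouns.py | calcute_num
-- ===== SOURCE A (Python) =====
-- def calcute_num (num:int):
--     '''it take an intger number then will print decreasing number pattern from num to 1 ,then convert to String it will return srting value'''
--     paterns=""
--     while num != 0:
--
--         for i in range(num,0,-1):
--             paterns +=str(i)+" "
--         paterns+="\n"
--
--         num-=1
--     return paterns
-- ===== SOURCE B (Python) =====
-- def calcute_num(num: int):
--     """Bottom-up single pass: each row reuses the previous shorter row, no nested loop."""
--     row = ""
--     rows = []
--     for v in range(1, num + 1):
--         row = str(v) + " " + row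
--         rows.append(row)
--     out = ""
--     for r in reversed(rows):
--         out += r + "\n"
--     return out
-- ===== Notes on version B (the rewrite author's own statement) =====
-- stated objective: faster
-- what changed: Replaces the nested while/for loops (re-generating each row from scratch) by a single bottom-up pass that builds each row by prepending to the previous one, then joins the rows in reverse; negative num (where A loops forever) is excluded by Pre_.
import Mathlib
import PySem

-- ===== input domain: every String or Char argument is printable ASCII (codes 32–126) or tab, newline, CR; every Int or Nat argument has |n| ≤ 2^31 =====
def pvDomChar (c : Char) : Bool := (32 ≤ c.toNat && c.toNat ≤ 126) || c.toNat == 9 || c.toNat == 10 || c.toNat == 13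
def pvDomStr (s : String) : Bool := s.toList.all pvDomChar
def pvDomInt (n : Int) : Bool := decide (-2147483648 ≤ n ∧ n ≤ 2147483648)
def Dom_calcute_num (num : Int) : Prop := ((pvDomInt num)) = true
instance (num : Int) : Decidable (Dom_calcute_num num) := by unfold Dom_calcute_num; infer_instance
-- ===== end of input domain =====

-- B builds each row by prepending to the previous row in one bottom-up pass (A re-generates every row
-- with a nested loop); Pre_ excludes negative num, on which A's `while num != 0` never terminates.


-- ===== PORT A =====
-- while num != 0: (for i in range(num,0,-1): paterns += str(i)+" "); paterns += "\n"; num -= 1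
-- fuel = num.toNat: under Pre_ (0 ≤ num) the while loop runs exactly num.toNat times.
def calcAuxA : Nat → Int → List Char → List Char
  | 0, _, paterns => paterns
  | fuel+1, num, paterns =>
      if num = 0 then paterns
      else
        let paterns' := (PySem.List.pyRange num 0 (-1)).foldl
            (fun s i => s ++ (PySem.Int.toChars i ++ [' '])) paterns ++ ['\n']
        calcAuxA fuel (num - 1) paterns'

def calcute_num (num : Int) : String :=
  String.ofList (calcAuxA num.toNat num [])

-- ===== PORT B =====
-- row = ""; rows = []; for v in range(1,num+1): row = str(v)+" "+row; rows.append(row)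
-- out = ""; for r in reversed(rows): out += r + "\n"; return out
def calcute_num_alt (num : Int) : String :=
  let p := (PySem.List.pyRange 1 (num + 1) 1).foldl
      (fun (p : List Char × List (List Char)) v =>
        let r := PySem.Int.toChars v ++ [' '] ++ p.1
        (r, p.2 ++ [r])) ([], [])
  String.ofList (p.2.reverse.foldl (fun out r => out ++ (r ++ ['\n'])) [])

-- ===== PRECONDITION & SPEC =====
-- Pre_ excludes num < 0: there A's `while num != 0` never reaches 0 and A diverges (no return value).
def Pre_calcute_num (num : Int) : Prop := 0 ≤ num
instance (num : Int) : Decidable (Pre_calcute_num num) := by unfold Pre_calcute_num; infer_instance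
def pvWitness_calcute_num : Int := (3)

def Spec_calcute_num (num : Int) (out : String) : Prop := out = calcute_num_alt num
instance (num : Int) (out : String) : Decidable (Spec_calcute_num num out) := by unfold Spec_calcute_num; infer_instance

-- ===== CLAIM (what is proved, stated in full; the proofs are below) =====
def Claim_equal_calcute_num : Prop := ∀ (num : Int), Dom_calcute_num num → Pre_calcute_num num → Spec_calcute_num num (calcute_num num)

-- ===== LEMMAS AND PROOFS =====

-- row for value n: "n n-1 … 1 " as chars
def rowN : Nat → List Char
  | 0 => []
  | n+1 => PySem.Int.toChars ((n : Int) + 1) ++ ' ' :: rowN n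

-- rows 1 … n in that order
def rowsL : Nat → List (List Char)
  | 0 => []
  | n+1 => rowsL n ++ [rowN (n+1)]

-- whole output: rows n, n-1, …, 1, each followed by '\n'
def bodyN : Nat → List Char
  | 0 => []
  | n+1 => (rowN (n+1) ++ ['\n']) ++ bodyN n

theorem rowA_eq (n : Nat) (acc : List Char) :
    (PySem.List.pyRange (n : Int) 0 (-1)).foldl
      (fun s i => s ++ (PySem.Int.toChars i ++ [' '])) acc = acc ++ rowN n := by
  induction n generalizing acc with
  | zero => simp [PySem.List.pyRange_neg_one_eq_nil, rowN]
  | succ k ih =>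
      rw [PySem.List.pyRange_neg_one_cons (by push_cast; omega)]
      simp only [List.foldl_cons]
      rw [show ((k+1 : Nat) : Int) - 1 = (k : Int) by push_cast; ring, ih]
      simp [rowN, List.append_assoc]

theorem calcAuxA_eq (n : Nat) (acc : List Char) :
    calcAuxA n (n : Int) acc = acc ++ bodyN n := by
  induction n generalizing acc with
  | zero => simp [calcAuxA, bodyN]
  | succ k ih =>
      rw [calcAuxA]
      have hne : ((k : Int) + 1) ≠ 0 := by omega
      simp only [Nat.cast_succ, hne, if_false]
      have : ((k : Int) + 1 - 1) = (k : Int) := by ring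
      rw [this]
      have hrow := rowA_eq (k+1) acc
      simp only [Nat.cast_succ] at hrow
      rw [hrow, ih]
      simp [bodyN, List.append_assoc]

theorem foldB_eq (n : Nat) :
    (PySem.List.pyRange 1 ((n : Int) + 1) 1).foldl
      (fun (p : List Char × List (List Char)) v =>
        let r := PySem.Int.toChars v ++ [' '] ++ p.1
        (r, p.2 ++ [r])) ([], []) = (rowN n, rowsL n) := by
  induction n with
  | zero => simp [PySem.List.pyRange_one_eq_nil, rowN, rowsL]
  | succ k ih =>
      have hsplit : PySem.List.pyRange 1 ((k : Int) + 1 + 1) 1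
          = PySem.List.pyRange 1 ((k : Int) + 1) 1 ++ [(k : Int) + 1] :=
        PySem.List.pyRange_one_succ_right (by omega)
      rw [show ((k+1 : Nat) : Int) = (k : Int) + 1 by push_cast; ring, hsplit,
        List.foldl_append, ih]
      simp [rowN, rowsL]

theorem joinB_eq (n : Nat) :
    (rowsL n).reverse.foldl (fun out r => out ++ (r ++ ['\n'])) [] = bodyN n := by
  have h : ∀ (m : Nat) (acc : List Char),
      (rowsL m).reverse.foldl (fun out r => out ++ (r ++ ['\n'])) acc = acc ++ bodyN m := by
    intro m
    induction m with
    | zero => intro acc; simp [rowsL, bodyN]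
    | succ k ih =>
        intro acc
        simp only [rowsL, List.reverse_append, List.reverse_cons, List.reverse_nil,
          List.nil_append, List.singleton_append, List.foldl_cons]
        rw [ih]
        simp [bodyN, List.append_assoc]
  simpa using h n []

-- ===== VERDICT (by name: the statement is the Claim_ definition above) =====
theorem calcute_num_spec : Claim_equal_calcute_num := by
  intro num _ hpre
  unfold Spec_calcute_num calcute_num calcute_num_alt
  obtain ⟨n, rfl⟩ : ∃ n : Nat, num = (n : Int) := ⟨num.toNat, (Int.toNat_of_nonneg hpre).symm⟩
  rw [Int.toNat_natCast, calcAuxA_eq]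
  dsimp only
  rw [foldB_eq]
  dsimp only
  rw [joinB_eq]
  simp
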